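-- pv_equiv track=rewrite | github.com/pypi-data/pypi-mirror-276 | packages/os-file-stream-handler/os_file_stream_handler-1.12.tar.gz/os_file_stream_handler-1.12/os_file_stream_handler/file_stream_handler.py | clear_text_from_last
-- ===== SOURCE A (Python) =====
-- def clear_text_from_last(lines, text):
--     for i in reversed(range(0, len(lines))):
--         found = False
--         if text in lines[i]:
--             found = True
--         lines.pop(-1)
--         if found:
--             return lines
-- ===== SOURCE B (Python) =====
-- def clear_text_from_last(lines, text):
--     last = -1
--     for i, line in enumerate(lines):
--         if text in line:
--             last = i
--     if last == -1:
--         lines.clear()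
--         return None
--     del lines[last:]
--     return lines
-- ===== Notes on version B (the rewrite author's own statement) =====
-- stated objective: simpler
-- what changed: Replaces A's reverse pop-per-element-with-flag loop by a single forward enumerate pass that records the index of the last matching line and then bulk-deletes the tail (del/clear), mutating the list the same way.
import Mathlib
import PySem

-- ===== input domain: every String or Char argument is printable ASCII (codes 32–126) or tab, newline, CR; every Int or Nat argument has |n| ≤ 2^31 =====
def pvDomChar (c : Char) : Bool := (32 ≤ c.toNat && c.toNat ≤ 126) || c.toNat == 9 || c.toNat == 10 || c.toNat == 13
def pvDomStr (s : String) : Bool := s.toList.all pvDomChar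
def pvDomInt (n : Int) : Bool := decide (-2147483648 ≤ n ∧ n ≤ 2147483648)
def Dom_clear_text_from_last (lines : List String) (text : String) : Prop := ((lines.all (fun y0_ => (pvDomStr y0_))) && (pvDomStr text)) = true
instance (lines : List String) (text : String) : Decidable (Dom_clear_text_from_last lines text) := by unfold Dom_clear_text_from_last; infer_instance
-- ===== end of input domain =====

-- B replaces A's reverse pop-with-flag loop by one forward pass recording the last matching
-- index, then bulk-deletes the tail (objective: simpler). Both Pythons mutate `lines` the same
-- way (emptied when no line matches, truncated to the prefix before the last match otherwise);
-- the equivalence proved here is about the return value.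

-- ===== PORT A =====
-- for i in reversed(range(0, len(lines))): found = text in lines[i]; lines.pop(-1); if found: return lines
def clearGoA (text : String) : List Int → List String → Option (List String)
  | [], _ => none
  | i :: is, cur =>
    match PySem.List.pyGet? cur i, PySem.List.pop? cur (-1) with
    | some s, some (_, rest) =>
        if PySem.Str.isIn text s then some rest else clearGoA text is rest
    | _, _ => none   -- unreachable in Python: index i and pop(-1) are always in range

def clear_text_from_last (lines : List String) (text : String) : Option (List String) :=
  clearGoA text ((PySem.List.pyRange 0 (lines.length : Int) 1).reverse) lines

-- ===== PORT B =====
def clear_text_from_last_alt (lines : List String) (text : String) : Option (List String) :=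
  let last := (PySem.List.enumerate lines).foldl
      (fun acc p => if PySem.Str.isIn text p.2 then p.1 else acc) (-1 : Int)
  if last == -1 then none
  else some (lines.take last.toNat)   -- del lines[last:] leaves lines[:last]; 0 ≤ last here

-- ===== PRECONDITION & SPEC =====
def Spec_clear_text_from_last (lines : List String) (text : String) (out : Option (List String)) : Prop := out = clear_text_from_last_alt lines text
instance (lines : List String) (text : String) (out : Option (List String)) : Decidable (Spec_clear_text_from_last lines text out) := by unfold Spec_clear_text_from_last; infer_instance

-- ===== CLAIM (what is proved, stated in full; the proofs are below) =====
def Claim_equal_clear_text_from_last : Prop := ∀ (lines : List String) (text : String), Dom_clear_text_from_last lines text → Spec_clear_text_from_last lines text (clear_text_from_last lines text)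

-- ===== LEMMAS AND PROOFS =====

lemma clearA_append (M : List String) (x : String) (text : String) :
    clear_text_from_last (M ++ [x]) text =
      if PySem.Str.isIn text x then some M else clear_text_from_last M text := by
  unfold clear_text_from_last
  have hlen : ((M ++ [x]).length : Int) = (M.length : Int) + 1 := by
    simp
  rw [hlen, PySem.List.pyRange_one_succ_right (by positivity)]
  rw [List.reverse_append]
  simp only [List.reverse_singleton, List.singleton_append]
  rw [clearGoA]
  rw [PySem.List.pyGet?_natCast]
  simp [PySem.List.pop?_last]

lemma enumerate_append (M : List String) (x : String) (s : Int) :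
    PySem.List.enumerate (M ++ [x]) s
      = PySem.List.enumerate M s ++ [((s + M.length : Int), x)] := by
  induction M generalizing s with
  | nil => simp [PySem.List.enumerate_nil, PySem.List.enumerate_cons]
  | cons a as ih =>
    simp only [List.cons_append, PySem.List.enumerate_cons, ih]
    simp
    ring_nf

lemma lastIdx_lt (text : String) (M : List String) (s a : Int) (h : a < s) :
    (PySem.List.enumerate M s).foldl
      (fun acc p => if PySem.Str.isIn text p.2 then p.1 else acc) a < s + M.length := by
  induction M generalizing s a with
  | nil => simpa [PySem.List.enumerate_nil] using h
  | cons b bs ih =>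
    simp only [PySem.List.enumerate_cons, List.foldl_cons]
    have h' : (if PySem.Str.isIn text b then s else a) < s + 1 := by
      split <;> omega
    have := ih (s + 1) _ h'
    simp only [List.length_cons]
    push_cast
    push_cast at this
    linarith

lemma lastIdx_ge (text : String) (M : List String) (s a : Int) :
    (PySem.List.enumerate M s).foldl
      (fun acc p => if PySem.Str.isIn text p.2 then p.1 else acc) a = a ∨
    (PySem.List.enumerate M s).foldl
      (fun acc p => if PySem.Str.isIn text p.2 then p.1 else acc) a ≥ s := by
  induction M generalizing s a with
  | nil => simp [PySem.List.enumerate_nil]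
  | cons b bs ih =>
    simp only [PySem.List.enumerate_cons, List.foldl_cons]
    rcases ih (s + 1) (if PySem.Str.isIn text b then s else a) with h | h
    · rw [h]
      split
      · right; omega
      · left; rfl
    · right; omega

lemma clearB_append (M : List String) (x : String) (text : String) :
    clear_text_from_last_alt (M ++ [x]) text =
      if PySem.Str.isIn text x then some M else clear_text_from_last_alt M text := by
  unfold clear_text_from_last_alt
  rw [enumerate_append, List.foldl_append]
  set r := (PySem.List.enumerate M 0).foldl
      (fun acc p => if PySem.Str.isIn text p.2 then p.1 else acc) (-1 : Int) with hr
  simp only [List.foldl_cons, List.foldl_nil]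
  by_cases hx : PySem.Str.isIn text x
  · simp only [hx, if_true, zero_add]
    have : ((M.length : Int) == -1) = false := by
      simp only [beq_eq_false_iff_ne]; omega
    rw [this]
    simp
  · simp only [hx, Bool.false_eq_true, if_false]
    by_cases h0 : r = -1
    · simp [h0]
    · have hlt : r < (0 : Int) + M.length := lastIdx_lt text M 0 (-1) (by omega)
      have hge : r ≥ 0 := by
        rcases lastIdx_ge text M 0 (-1) with h | h
        · exact absurd h h0
        · exact h
      have hne : (r == -1) = false := by simp only [beq_eq_false_iff_ne]; omega
      rw [hne]
      simp only [Bool.false_eq_true, if_false, Option.some.injEq]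
      apply List.take_append_of_le_length
      omega

lemma both_eq (lines : List String) (text : String) :
    clear_text_from_last lines text = clear_text_from_last_alt lines text := by
  induction lines using List.reverseRecOn with
  | nil =>
    simp [clear_text_from_last, clear_text_from_last_alt, clearGoA,
      PySem.List.pyRange_one_eq_nil, PySem.List.enumerate_nil]
  | append_singleton M x ih =>
    rw [clearA_append, clearB_append, ih]

-- ===== VERDICT (by name: the statement is the Claim_ definition above) =====
theorem clear_text_from_last_spec : Claim_equal_clear_text_from_last := by
  intro lines text _
  unfold Spec_clear_text_from_last
  exact both_eq lines text
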